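-- pv_equiv track=rewrite | github.com/DiabCh/homework_scoala_informala | homework_2.py | does_everything
-- ===== SOURCE A (Python) =====
-- def does_everything(number, sumof=0, even_sum=0, odd_sum=0):
--     for dummy in range(number+1):
--         sumof = dummy + sumof
-- # or alternatively just return sum(range(number+1)
--     for dummy in range(number+1):
--         if dummy % 2 == 0:
--             even_sum = even_sum + dummy
--     for dummy in range(number+1):
--         if dummy % 2 != 0:
--             odd_sum = odd_sum + dummy
--     return sumof, even_sum, odd_sum
-- ===== SOURCE B (Python) =====
-- def does_everything(number, sumof=0, even_sum=0, odd_sum=0):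
--     n = number if number >= 0 else 0
--     half = n // 2
--     evens = half * (half + 1)          # sum of evens in 0..n
--     odds = ((n + 1) // 2) ** 2         # sum of odds in 0..n
--     return sumof + evens + odds, even_sum + evens, odd_sum + odds
-- ===== Notes on version B (the rewrite author's own statement) =====
-- stated objective: faster
-- what changed: Replaced the three O(n) loops over range(number+1) with closed-form arithmetic-series formulas for the total, even and odd sums.
import Mathlib
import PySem

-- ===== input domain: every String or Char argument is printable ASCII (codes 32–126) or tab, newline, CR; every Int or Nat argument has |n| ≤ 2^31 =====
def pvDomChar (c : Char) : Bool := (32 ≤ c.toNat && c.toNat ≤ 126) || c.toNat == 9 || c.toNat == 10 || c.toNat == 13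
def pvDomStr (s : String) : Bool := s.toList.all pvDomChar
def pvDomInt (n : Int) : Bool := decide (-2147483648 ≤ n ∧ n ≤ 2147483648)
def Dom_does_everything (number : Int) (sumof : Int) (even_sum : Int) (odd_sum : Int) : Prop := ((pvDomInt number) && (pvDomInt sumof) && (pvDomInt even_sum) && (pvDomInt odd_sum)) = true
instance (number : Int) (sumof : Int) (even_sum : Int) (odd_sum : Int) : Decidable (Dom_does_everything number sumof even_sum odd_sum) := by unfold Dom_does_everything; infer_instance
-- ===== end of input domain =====

-- B replaces A's three linear loops by closed-form arithmetic-series formulas (asymptotically faster).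

-- ===== PORT A =====
def does_everything (number : Int) (sumof : Int) (even_sum : Int) (odd_sum : Int) : List Int :=
  -- loop 1: sumof = dummy + sumof
  let sumof := (PySem.List.pyRange 0 (number + 1) 1).foldl (fun sumof dummy => dummy + sumof) sumof
  -- loop 2: if dummy % 2 == 0: even_sum = even_sum + dummy
  let even_sum := (PySem.List.pyRange 0 (number + 1) 1).foldl
    (fun even_sum dummy => if PySem.Int.mod dummy 2 = 0 then even_sum + dummy else even_sum) even_sum
  -- loop 3: if dummy % 2 != 0: odd_sum = odd_sum + dummy
  let odd_sum := (PySem.List.pyRange 0 (number + 1) 1).foldl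
    (fun odd_sum dummy => if PySem.Int.mod dummy 2 ≠ 0 then odd_sum + dummy else odd_sum) odd_sum
  [sumof, even_sum, odd_sum]

-- ===== PORT B =====
def does_everything_alt (number : Int) (sumof : Int) (even_sum : Int) (odd_sum : Int) : List Int :=
  let n := if number ≥ 0 then number else 0
  let half := PySem.Int.floordiv n 2
  let evens := half * (half + 1)
  let odds := (PySem.Int.floordiv (n + 1) 2) ^ 2
  [sumof + evens + odds, even_sum + evens, odd_sum + odds]

-- ===== PRECONDITION & SPEC =====
def Spec_does_everything (number : Int) (sumof : Int) (even_sum : Int) (odd_sum : Int) (out : List Int) : Prop := out = does_everything_alt number sumof even_sum odd_sum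
instance (number : Int) (sumof : Int) (even_sum : Int) (odd_sum : Int) (out : List Int) : Decidable (Spec_does_everything number sumof even_sum odd_sum out) := by unfold Spec_does_everything; infer_instance

-- ===== CLAIM (what is proved, stated in full; the proofs are below) =====
def Claim_equal_does_everything : Prop := ∀ (number : Int) (sumof : Int) (even_sum : Int) (odd_sum : Int), Dom_does_everything number sumof even_sum odd_sum → Spec_does_everything number sumof even_sum odd_sum (does_everything number sumof even_sum odd_sum)

-- ===== LEMMAS AND PROOFS =====

-- closed forms: sum of evens in 0..n and sum of odds in 0..n
def pvE (n : Nat) : Int := ((n / 2 : Nat) : Int) * (((n / 2 : Nat) : Int) + 1)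
def pvO (n : Nat) : Int := (((n + 1) / 2 : Nat) : Int) ^ 2

theorem pv_EO_succ (m : Nat) : pvE (m + 1) + pvO (m + 1) = pvE m + pvO m + ((m : Int) + 1) := by
  unfold pvE pvO
  rcases Nat.even_or_odd' m with ⟨k, hk | hk⟩ <;> subst hk
  · rw [show (2 * k) / 2 = k by omega, show (2 * k + 1) / 2 = k by omega,
        show (2 * k + 1 + 1) / 2 = k + 1 by omega]
    push_cast; ring
  · rw [show (2 * k + 1) / 2 = k by omega, show (2 * k + 1 + 1) / 2 = k + 1 by omega,
        show (2 * k + 1 + 1 + 1) / 2 = k + 1 by omega]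
    push_cast; ring

-- loop 1 over 0..n sums to (sum of evens) + (sum of odds)
theorem pv_fold_sum (n : Nat) : ∀ s : Int,
    (PySem.List.pyRange 0 ((n : Int) + 1) 1).foldl (fun acc d => d + acc) s
      = s + pvE n + pvO n := by
  induction n with
  | zero => intro s; simp [PySem.List.pyRange_one, pvE, pvO]
  | succ m ih =>
    intro s
    rw [show ((m + 1 : Nat) : Int) + 1 = ((m : Int) + 1) + 1 by push_cast; ring,
        PySem.List.pyRange_one_succ_right (by positivity)]
    rw [List.foldl_append, ih s]
    simp only [List.foldl_cons, List.foldl_nil]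
    have := pv_EO_succ m
    linarith
  
-- loop 2 over 0..n adds the sum of the even numbers
theorem pv_fold_even (n : Nat) : ∀ e : Int,
    (PySem.List.pyRange 0 ((n : Int) + 1) 1).foldl
      (fun acc d => if PySem.Int.mod d 2 = 0 then acc + d else acc) e
      = e + pvE n := by
  induction n with
  | zero => intro e; simp [PySem.List.pyRange_one, PySem.Int.mod, pvE]
  | succ m ih =>
    intro e
    rw [show ((m + 1 : Nat) : Int) + 1 = ((m : Int) + 1) + 1 by push_cast; ring,
        PySem.List.pyRange_one_succ_right (by positivity)]
    rw [List.foldl_append, ih e]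
    simp only [List.foldl_cons, List.foldl_nil]
    rw [PySem.Int.mod_eq_emod_of_pos (by norm_num : (0 : Int) < 2)]
    unfold pvE
    rcases Nat.even_or_odd' m with ⟨k, hk | hk⟩ <;> subst hk
    · rw [if_neg (by push_cast; omega), show (2 * k) / 2 = k by omega,
          show (2 * k + 1) / 2 = k by omega]
    · rw [if_pos (by push_cast; omega),
          show (2 * k + 1) / 2 = k by omega, show (2 * k + 1 + 1) / 2 = k + 1 by omega]
      push_cast; ring

-- loop 3 over 0..n adds the sum of the odd numbers
theorem pv_fold_odd (n : Nat) : ∀ o : Int,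
    (PySem.List.pyRange 0 ((n : Int) + 1) 1).foldl
      (fun acc d => if PySem.Int.mod d 2 ≠ 0 then acc + d else acc) o
      = o + pvO n := by
  induction n with
  | zero => intro o; simp [PySem.List.pyRange_one, PySem.Int.mod, pvO]
  | succ m ih =>
    intro o
    rw [show ((m + 1 : Nat) : Int) + 1 = ((m : Int) + 1) + 1 by push_cast; ring,
        PySem.List.pyRange_one_succ_right (by positivity)]
    rw [List.foldl_append, ih o]
    simp only [List.foldl_cons, List.foldl_nil]
    rw [PySem.Int.mod_eq_emod_of_pos (by norm_num : (0 : Int) < 2)]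
    unfold pvO
    rcases Nat.even_or_odd' m with ⟨k, hk | hk⟩ <;> subst hk
    · rw [if_pos (by push_cast; omega),
          show (2 * k + 1) / 2 = k by omega, show (2 * k + 1 + 1) / 2 = k + 1 by omega]
      push_cast; ring
    · rw [if_neg (by push_cast; omega), show (2 * k + 1 + 1) / 2 = k + 1 by omega,
          show (2 * k + 1 + 1 + 1) / 2 = k + 1 by omega]

-- ===== VERDICT (by name: the statement is the Claim_ definition above) =====
theorem does_everything_spec : Claim_equal_does_everything := by
  intro number sumof even_sum odd_sum _
  unfold Spec_does_everything does_everything does_everything_alt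
  by_cases hn : number ≥ 0
  · obtain ⟨n, rfl⟩ : ∃ n : Nat, number = (n : Int) := ⟨number.toNat, (Int.toNat_of_nonneg hn).symm⟩
    rw [pv_fold_sum, pv_fold_even, pv_fold_odd]
    simp only [if_pos hn]
    have hf1 : PySem.Int.floordiv (n : Int) 2 = ((n / 2 : Nat) : Int) := by
      exact_mod_cast PySem.Int.floordiv_natCast n 2
    have hf2 : PySem.Int.floordiv ((n : Int) + 1) 2 = (((n + 1) / 2 : Nat) : Int) := by
      rw [show ((n : Int) + 1) = (((n + 1 : Nat)) : Int) by push_cast; ring]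
      exact_mod_cast PySem.Int.floordiv_natCast (n + 1) 2
    rw [hf1, hf2]
    simp [pvE, pvO, add_assoc]
  · rw [PySem.List.pyRange_one_eq_nil (by omega)]
    simp only [List.foldl_nil, if_neg hn]
    norm_num [show PySem.Int.floordiv 1 2 = 0 by decide]
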